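-- pv_equiv track=rewrite | github.com/gdetam/ylab_course | hw_01/task_05.py | count_find_num
-- ===== SOURCE A (Python) =====
-- import math
--
-- def count_find_num(primesL: list, limit: int) -> list:
--     all_values: list = []
--     total = math.prod(primesL)
--     all_values.append(total)
--     if total > limit:
--         return []
--
--     for num in primesL:
--         for total in all_values:
--             value = num * total
--             if value <= limit and value not in all_values:
--                 all_values.append(value)
--
--     return [len(all_values), max(all_values)]
-- ===== SOURCE B (Python) =====
-- import math
--
--
-- def count_find_num(primesL: list, limit: int) -> list:
--     total = math.prod(primesL)
--     if total > limit:
--         return []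
--     seen = {total}
--     for p in primesL:
--         new = set(seen)
--         for v in seen:
--             w = v * p
--             while w <= limit and w not in new:
--                 new.add(w)
--                 w *= p
--         seen = new
--     return [len(seen), max(seen)]
-- ===== Notes on version B (the rewrite author's own statement) =====
-- stated objective: alternative
-- what changed: A saturates a growing list by re-scanning it with an index iterator and a linear 'value not in all_values' list test; B instead expands, per prime, the power chain v*p, v*p^2, ... of each already-found value into a hash set, trading the self-extending list scan for per-value geometric chains with set membership.
-- outside the precondition, e.g. on count_find_num([-2], 10): A returns [3, 4], B returns [3, 4]
import Mathlib
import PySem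

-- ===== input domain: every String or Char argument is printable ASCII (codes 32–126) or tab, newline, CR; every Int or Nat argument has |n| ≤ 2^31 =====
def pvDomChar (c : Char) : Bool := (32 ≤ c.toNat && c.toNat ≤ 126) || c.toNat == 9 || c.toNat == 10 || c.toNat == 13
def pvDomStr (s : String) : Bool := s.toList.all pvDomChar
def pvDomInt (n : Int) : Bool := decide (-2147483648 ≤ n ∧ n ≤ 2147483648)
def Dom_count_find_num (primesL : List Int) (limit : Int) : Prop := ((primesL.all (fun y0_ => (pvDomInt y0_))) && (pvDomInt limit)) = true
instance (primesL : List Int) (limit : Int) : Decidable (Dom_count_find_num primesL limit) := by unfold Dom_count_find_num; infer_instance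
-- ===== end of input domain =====

-- B replaces A's growing-list index scan (with linear `in`-list tests) by per-prime
-- power-chain expansion over a hash set; same value on Pre_ (see Pre_ comment).

-- ===== PORT A =====
-- Python's `for total in all_values` iterates the growing list by index, stopping when
-- the index reaches the current length; ported with fuel (under Pre_ the list holds at
-- most limit+1 distinct values in [0,limit], so fuel limit.toNat+2 is never exhausted).
def pvInnerA (num limit : Int) : Nat → List Int → Nat → List Int
  | 0, vals, _ => vals
  | f + 1, vals, i =>
    match vals[i]? with
    | none => vals
    | some t =>
      let value := num * t
      pvInnerA num limit f (if value ≤ limit ∧ value ∉ vals then vals ++ [value] else vals) (i + 1)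

def count_find_num (primesL : List Int) (limit : Int) : List Int :=
  let total := primesL.foldl (· * ·) 1            -- math.prod(primesL)
  let all_values : List Int := [total]
  if total > limit then []
  else
    let r := primesL.foldl (fun vals num => pvInnerA num limit (limit.toNat + 2) vals 0) all_values
    -- r is nonempty (it contains total), so Python's max never raises; max? is `some` here
    [(r.length : Int), (PySem.List.max? r (fun x => x)).getD 0]

-- ===== PORT B =====
-- the `while w <= limit and w not in new: new.add(w); w *= p` chain; fueled like pvInnerA
def pvPowB (p limit : Int) : Nat → Int → PySem.Set Int → PySem.Set Int
  | 0, _, nw => nw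
  | f + 1, w, nw =>
    if w ≤ limit ∧ w ∉ nw then pvPowB p limit f (w * p) (PySem.Set.add nw w) else nw

def count_find_num_alt (primesL : List Int) (limit : Int) : List Int :=
  let total := primesL.foldl (· * ·) 1            -- math.prod(primesL)
  if total > limit then []
  else
    let seen := primesL.foldl
      (fun seen p => seen.foldl (fun nw v => pvPowB p limit (limit.toNat + 2) (v * p) nw)
        (PySem.Set.ofList seen))
      (PySem.Set.add PySem.Set.empty total)
    -- seen is nonempty (it contains total); len/max are iteration-order independent
    [PySem.Set.len seen, (PySem.List.max? seen (fun x => x)).getD 0]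

-- ===== PRECONDITION & SPEC =====
-- Pre_ excludes lists containing a negative number whose product is ≤ limit: there A's
-- growing-list loop can multiply negative values (always ≤ limit) forever and diverges
-- on some such inputs (e.g. primesL=[-1,2], limit=10).
def Pre_count_find_num (primesL : List Int) (limit : Int) : Prop :=
  (∀ p ∈ primesL, 0 ≤ p) ∨ limit < primesL.prod
instance (primesL : List Int) (limit : Int) : Decidable (Pre_count_find_num primesL limit) := by unfold Pre_count_find_num; infer_instance

def pvWitness_count_find_num : List Int × Int := ([2, 3], 20)

def Spec_count_find_num (primesL : List Int) (limit : Int) (out : List Int) : Prop := out = count_find_num_alt primesL limit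
instance (primesL : List Int) (limit : Int) (out : List Int) : Decidable (Spec_count_find_num primesL limit out) := by unfold Spec_count_find_num; infer_instance

-- ===== CLAIM (what is proved, stated in full; the proofs are below) =====
def Claim_equal_count_find_num : Prop := ∀ (primesL : List Int) (limit : Int), Dom_count_find_num primesL limit → Pre_count_find_num primesL limit → Spec_count_find_num primesL limit (count_find_num primesL limit)

-- ===== LEMMAS AND PROOFS =====

-- invariant: distinct values, all in [0, limit]
def pvInv (limit : Int) (l : List Int) : Prop := l.Nodup ∧ ∀ v ∈ l, 0 ≤ v ∧ v ≤ limit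

-- closure of the start set S under multiplication by p, bounded by limit —
-- the common characterisation of A's saturation list and B's saturation set
inductive pvCl (p limit : Int) (S : Int → Prop) : Int → Prop
  | base {v : Int} : S v → pvCl p limit S v
  | step {v : Int} : pvCl p limit S v → v * p ≤ limit → pvCl p limit S (v * p)

lemma pvCl_nonneg {p limit : Int} {S : Int → Prop} (hp : 0 ≤ p) (hS : ∀ v, S v → 0 ≤ v)
    {v : Int} (h : pvCl p limit S v) : 0 ≤ v := by
  induction h with
  | base hv => exact hS _ hv
  | step _ _ ih => exact mul_nonneg ih hp

lemma pvCl_mono {p limit : Int} {S T : Int → Prop} (hST : ∀ v, S v → T v)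
    {v : Int} (h : pvCl p limit S v) : pvCl p limit T v := by
  induction h with
  | base hv => exact pvCl.base (hST _ hv)
  | step _ hle ih => exact pvCl.step ih hle

lemma pvCl_subset {p limit : Int} {S : Int → Prop} (T : List Int)
    (hb : ∀ v, S v → v ∈ T) (hc : ∀ v ∈ T, v * p ≤ limit → v * p ∈ T)
    {v : Int} (h : pvCl p limit S v) : v ∈ T := by
  induction h with
  | base hv => exact hb _ hv
  | step _ hle ih => exact hc _ ih hle

lemma pvLen_le {limit : Int} {l : List Int} (h : pvInv limit l) (hlim : 0 ≤ limit) :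
    l.length ≤ limit.toNat + 1 := by
  classical
  have hsub : l.toFinset ⊆ Finset.Icc (0 : Int) limit := by
    intro x hx
    rcases h.2 x (List.mem_toFinset.mp hx) with ⟨h1, h2⟩
    exact Finset.mem_Icc.mpr ⟨h1, h2⟩
  have hcard := Finset.card_le_card hsub
  rw [List.toFinset_card_of_nodup h.1, Int.card_Icc] at hcard
  omega

lemma pvInnerA_step_none (num limit : Int) (f : Nat) {vals : List Int} {i : Nat}
    (h : vals[i]? = none) : pvInnerA num limit (f + 1) vals i = vals := by
  simp only [pvInnerA, h]

lemma pvInnerA_step_some (num limit : Int) (f : Nat) {vals : List Int} {i : Nat} {t : Int}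
    (h : vals[i]? = some t) :
    pvInnerA num limit (f + 1) vals i =
      pvInnerA num limit f (if num * t ≤ limit ∧ num * t ∉ vals then vals ++ [num * t] else vals) (i + 1) := by
  simp only [pvInnerA, h]

lemma pvInnerA_main (num limit : Int) (hnum : 0 ≤ num) (hlim : 0 ≤ limit) (S : Int → Prop) :
    ∀ (f : Nat) (vals : List Int) (i : Nat),
      pvInv limit vals →
      (∀ v ∈ vals, pvCl num limit S v) →
      limit.toNat + 2 - i ≤ f →
      (∀ j, j < i → ∀ (hj : j < vals.length), vals[j] * num ≤ limit → vals[j] * num ∈ vals) →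
      (∀ v ∈ vals, v ∈ pvInnerA num limit f vals i) ∧
      pvInv limit (pvInnerA num limit f vals i) ∧
      (∀ v ∈ pvInnerA num limit f vals i, v * num ≤ limit → v * num ∈ pvInnerA num limit f vals i) ∧
      (∀ v ∈ pvInnerA num limit f vals i, pvCl num limit S v) := by
  intro f
  induction f with
  | zero =>
    intro vals i hInv hCl hfuel hproc
    have hlen := pvLen_le hInv hlim
    simp only [pvInnerA]
    refine ⟨fun v hv => hv, hInv, ?_, hCl⟩
    intro v hv hle
    rcases List.mem_iff_getElem.mp hv with ⟨j, hj, rfl⟩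
    exact hproc j (by omega) hj hle
  | succ f ih =>
    intro vals i hInv hCl hfuel hproc
    cases hgi : vals[i]? with
    | none =>
      have hlen : vals.length ≤ i := by
        simpa using (List.getElem?_eq_none_iff.mp hgi)
      rw [pvInnerA_step_none num limit f hgi]
      refine ⟨fun v hv => hv, hInv, ?_, hCl⟩
      intro v hv hle
      rcases List.mem_iff_getElem.mp hv with ⟨j, hj, rfl⟩
      exact hproc j (by omega) hj hle
    | some t =>
      have hilt : i < vals.length := by
        by_contra hcon
        rw [List.getElem?_eq_none (by omega)] at hgi
        simp at hgi
      have htval : vals[i] = t := by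
        have := List.getElem?_eq_getElem hilt
        rw [hgi] at this
        exact (Option.some.injEq _ _).mp this.symm
      have htmem : t ∈ vals := htval ▸ List.getElem_mem hilt
      rw [pvInnerA_step_some num limit f hgi]
      by_cases hc : num * t ≤ limit ∧ num * t ∉ vals
      · rw [if_pos hc]
        have hInv' : pvInv limit (vals ++ [num * t]) := by
          constructor
          · simp [List.nodup_append, hInv.1]
            intro a ha h
            exact hc.2 (h ▸ ha)
          · intro v hv
            rcases List.mem_append.mp hv with hv | hv
            · exact hInv.2 v hv
            · rcases List.mem_singleton.mp hv with rfl
              exact ⟨mul_nonneg hnum (hInv.2 t htmem).1, hc.1⟩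
        have hCl' : ∀ v ∈ vals ++ [num * t], pvCl num limit S v := by
          intro v hv
          rcases List.mem_append.mp hv with hv | hv
          · exact hCl v hv
          · rcases List.mem_singleton.mp hv with rfl
            rw [mul_comm]
            exact pvCl.step (hCl t htmem) (by rw [mul_comm]; exact hc.1)
        have hproc' : ∀ j, j < i + 1 → ∀ (hj : j < (vals ++ [num * t]).length),
            (vals ++ [num * t])[j] * num ≤ limit → (vals ++ [num * t])[j] * num ∈ vals ++ [num * t] := by
          intro j hji hj
          have hjv : j < vals.length := by omega
          rw [List.getElem_append_left hjv]
          intro hle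
          by_cases hji' : j < i
          · exact List.mem_append_left _ (hproc j hji' hjv hle)
          · have : j = i := by omega
            subst this
            rw [htval, mul_comm]
            exact List.mem_append_right _ (List.mem_singleton.mpr rfl)
        obtain ⟨h1, h2, h3, h4⟩ := ih (vals ++ [num * t]) (i + 1) hInv' hCl' (by omega) hproc'
        exact ⟨fun v hv => h1 v (List.mem_append_left _ hv), h2, h3, h4⟩
      · rw [if_neg hc]
        have hproc' : ∀ j, j < i + 1 → ∀ (hj : j < vals.length),
            vals[j] * num ≤ limit → vals[j] * num ∈ vals := by
          intro j hji hj hle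
          by_cases hji' : j < i
          · exact hproc j hji' hj hle
          · have : j = i := by omega
            subst this
            rw [htval] at hle ⊢
            push Not at hc
            rw [mul_comm]
            exact hc (by rw [mul_comm]; exact hle)
        exact ih vals (i + 1) hInv hCl (by omega) hproc'

lemma pvPowB_main (p limit : Int) (hp : 0 ≤ p) (hlim : 0 ≤ limit) (S : Int → Prop)
    (hS0 : ∀ v, S v → 0 ≤ v) :
    ∀ (f : Nat) (w : Int) (nw : List Int),
      pvInv limit nw →
      (∀ x ∈ nw, pvCl p limit S x) →
      (∃ u, pvCl p limit S u ∧ w = u * p) →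
      limit.toNat + 2 - nw.length ≤ f →
      (∀ x ∈ nw, x ∈ pvPowB p limit f w nw) ∧
      pvInv limit (pvPowB p limit f w nw) ∧
      (∀ x ∈ pvPowB p limit f w nw, x ∉ nw → x * p ≤ limit → x * p ∈ pvPowB p limit f w nw) ∧
      (∀ x ∈ pvPowB p limit f w nw, pvCl p limit S x) ∧
      (w ≤ limit → w ∈ pvPowB p limit f w nw) := by
  intro f
  induction f with
  | zero =>
    intro w nw hInv hCl hw hfuel
    have := pvLen_le hInv hlim
    omega
  | succ f ih =>
    intro w nw hInv hCl hw hfuel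
    by_cases hc : w ≤ limit ∧ w ∉ nw
    · have hstep : pvPowB p limit (f + 1) w nw = pvPowB p limit f (w * p) (nw ++ [w]) := by
        have hadd : PySem.Set.add nw w = nw ++ [w] := by
          simp [PySem.Set.add, PySem.Set.contains, hc.2]
        simp only [pvPowB, if_pos hc, hadd]
      rcases hw with ⟨u, hu, rfl⟩
      have hClw : pvCl p limit S (u * p) := pvCl.step hu hc.1
      have hInv' : pvInv limit (nw ++ [u * p]) := by
        constructor
        · simp [List.nodup_append, hInv.1]
          intro a ha h
          exact hc.2 (h ▸ ha)
        · intro x hx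
          rcases List.mem_append.mp hx with hx | hx
          · exact hInv.2 x hx
          · rcases List.mem_singleton.mp hx with rfl
            exact ⟨pvCl_nonneg hp hS0 hClw, hc.1⟩
      have hCl' : ∀ x ∈ nw ++ [u * p], pvCl p limit S x := by
        intro x hx
        rcases List.mem_append.mp hx with hx | hx
        · exact hCl x hx
        · rcases List.mem_singleton.mp hx with rfl; exact hClw
      obtain ⟨h1, h2, h3, h4, h5⟩ := ih (u * p * p) (nw ++ [u * p]) hInv' hCl'
        ⟨u * p, hClw, rfl⟩ (by simp; omega)
      rw [hstep]
      have hwin : u * p ∈ pvPowB p limit f (u * p * p) (nw ++ [u * p]) :=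
        h1 _ (List.mem_append_right _ (List.mem_singleton.mpr rfl))
      refine ⟨fun x hx => h1 x (List.mem_append_left _ hx), h2, ?_, h4, fun _ => hwin⟩
      intro x hx hxnw hxle
      by_cases hxw : x = u * p
      · subst hxw; exact h5 hxle
      · refine h3 x hx ?_ hxle
        intro hx'
        rcases List.mem_append.mp hx' with hx' | hx'
        · exact hxnw hx'
        · exact hxw (List.mem_singleton.mp hx')
    · have hstep : pvPowB p limit (f + 1) w nw = nw := by
        simp only [pvPowB, if_neg hc]
      rw [hstep]
      push Not at hc
      refine ⟨fun x hx => hx, hInv, ?_, hCl, hc⟩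
      intro x hx hxnw
      exact absurd hx hxnw

lemma pvFoldB_main (p limit : Int) (hp : 0 ≤ p) (hlim : 0 ≤ limit) (S : Int → Prop)
    (hS0 : ∀ v, S v → 0 ≤ v) :
    ∀ (todo : List Int) (nw : List Int),
      pvInv limit nw →
      (∀ x ∈ nw, pvCl p limit S x) →
      (∀ v ∈ todo, pvCl p limit S v) →
      (∀ x ∈ nw, (x * p ≤ limit → x * p ∈ nw) ∨ x ∈ todo) →
      (∀ x ∈ nw, x ∈ todo.foldl (fun nw v => pvPowB p limit (limit.toNat + 2) (v * p) nw) nw) ∧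
      pvInv limit (todo.foldl (fun nw v => pvPowB p limit (limit.toNat + 2) (v * p) nw) nw) ∧
      (∀ x ∈ todo.foldl (fun nw v => pvPowB p limit (limit.toNat + 2) (v * p) nw) nw, pvCl p limit S x) ∧
      (∀ x ∈ todo.foldl (fun nw v => pvPowB p limit (limit.toNat + 2) (v * p) nw) nw,
        x * p ≤ limit → x * p ∈ todo.foldl (fun nw v => pvPowB p limit (limit.toNat + 2) (v * p) nw) nw) := by
  intro todo
  induction todo with
  | nil =>
    intro nw hInv hCl htodo hI2
    refine ⟨fun x hx => hx, hInv, hCl, ?_⟩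
    intro x hx hle
    rcases hI2 x hx with h | h
    · exact h hle
    · exact absurd h (List.not_mem_nil)
  | cons v rest ih =>
    intro nw hInv hCl htodo hI2
    simp only [List.foldl_cons]
    obtain ⟨h1, h2, h3, h4, h5⟩ := pvPowB_main p limit hp hlim S hS0 (limit.toNat + 2) (v * p) nw
      hInv hCl ⟨v, htodo v (List.mem_cons_self), rfl⟩ (by omega)
    have hI2' : ∀ x ∈ pvPowB p limit (limit.toNat + 2) (v * p) nw,
        (x * p ≤ limit → x * p ∈ pvPowB p limit (limit.toNat + 2) (v * p) nw) ∨ x ∈ rest := by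
      intro x hx
      by_cases hxnw : x ∈ nw
      · rcases hI2 x hxnw with h | h
        · exact Or.inl (fun hle => h1 _ (h hle))
        · rcases List.mem_cons.mp h with rfl | h
          · exact Or.inl h5
          · exact Or.inr h
      · exact Or.inl (h3 x hx hxnw)
    obtain ⟨g1, g2, g3, g4⟩ := ih (pvPowB p limit (limit.toNat + 2) (v * p) nw) h2 h4
      (fun u hu => htodo u (List.mem_cons_of_mem _ hu)) hI2'
    exact ⟨fun x hx => g1 x (h1 x hx), g2, g3, g4⟩

-- one prime processed on membership-equal accumulators keeps membership equal
lemma pvOuter (limit : Int) (hlim : 0 ≤ limit) :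
    ∀ (ps : List Int) (l s : List Int),
      (∀ q ∈ ps, 0 ≤ q) → pvInv limit l → pvInv limit s → l ≠ [] → (∀ x, x ∈ l ↔ x ∈ s) →
      pvInv limit (ps.foldl (fun vals num => pvInnerA num limit (limit.toNat + 2) vals 0) l) ∧
      pvInv limit (ps.foldl (fun seen p => seen.foldl (fun nw v => pvPowB p limit (limit.toNat + 2) (v * p) nw) (PySem.Set.ofList seen)) s) ∧
      (ps.foldl (fun vals num => pvInnerA num limit (limit.toNat + 2) vals 0) l) ≠ [] ∧
      (∀ x, x ∈ ps.foldl (fun vals num => pvInnerA num limit (limit.toNat + 2) vals 0) l ↔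
        x ∈ ps.foldl (fun seen p => seen.foldl (fun nw v => pvPowB p limit (limit.toNat + 2) (v * p) nw) (PySem.Set.ofList seen)) s) := by
  intro ps
  induction ps with
  | nil =>
    intro l s _ hIl hIs hne hmem
    exact ⟨hIl, hIs, hne, hmem⟩
  | cons q qs ih =>
    intro l s hq hIl hIs hne hmem
    have hq0 : 0 ≤ q := hq q (List.mem_cons_self)
    simp only [List.foldl_cons]
    -- A's step
    obtain ⟨a1, a2, a3, a4⟩ := pvInnerA_main q limit hq0 hlim (· ∈ l) (limit.toNat + 2) l 0
      hIl (fun v hv => pvCl.base hv) (by omega) (by omega)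
    -- B's step
    have hS0 : ∀ v, v ∈ s → 0 ≤ v := fun v hv => (hIs.2 v hv).1
    have hIofl : pvInv limit (PySem.Set.ofList s) := by
      constructor
      · exact PySem.Set.nodup_ofList s
      · intro v hv; exact hIs.2 v ((PySem.Set.mem_ofList s v).mp hv)
    obtain ⟨b1, b2, b3, b4⟩ := pvFoldB_main q limit hq0 hlim (· ∈ s) hS0 s (PySem.Set.ofList s)
      hIofl (fun x hx => pvCl.base ((PySem.Set.mem_ofList s x).mp hx))
      (fun v hv => pvCl.base hv)
      (fun x hx => Or.inr ((PySem.Set.mem_ofList s x).mp hx))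
    -- membership characterisations
    have hAchar : ∀ x, x ∈ pvInnerA q limit (limit.toNat + 2) l 0 ↔ pvCl q limit (· ∈ l) x := by
      intro x
      constructor
      · exact a4 x
      · exact pvCl_subset _ a1 a3
    have hBchar : ∀ x, x ∈ s.foldl (fun nw v => pvPowB q limit (limit.toNat + 2) (v * q) nw) (PySem.Set.ofList s) ↔ pvCl q limit (· ∈ s) x := by
      intro x
      constructor
      · exact b3 x
      · exact pvCl_subset _ (fun v hv => b1 v ((PySem.Set.mem_ofList s v).mpr hv)) b4
    have hmem' : ∀ x, x ∈ pvInnerA q limit (limit.toNat + 2) l 0 ↔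
        x ∈ s.foldl (fun nw v => pvPowB q limit (limit.toNat + 2) (v * q) nw) (PySem.Set.ofList s) := by
      intro x
      rw [hAchar, hBchar]
      exact ⟨pvCl_mono (fun v hv => (hmem v).mp hv), pvCl_mono (fun v hv => (hmem v).mpr hv)⟩
    have hne' : pvInnerA q limit (limit.toNat + 2) l 0 ≠ [] := by
      rcases List.exists_mem_of_ne_nil l hne with ⟨x, hx⟩
      exact List.ne_nil_of_mem (a1 x hx)
    exact ih _ _ (fun r hr => hq r (List.mem_cons_of_mem _ hr)) a2 b2 hne' hmem'

lemma pvLen_eq {l s : List Int} (hl : l.Nodup) (hs : s.Nodup) (hmem : ∀ x, x ∈ l ↔ x ∈ s) :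
    l.length = s.length := by
  classical
  rw [← List.toFinset_card_of_nodup hl, ← List.toFinset_card_of_nodup hs]
  congr 1
  ext x
  simp only [List.mem_toFinset]
  exact hmem x

lemma pvMax_eq {l s : List Int} (hne : l ≠ []) (hmem : ∀ x, x ∈ l ↔ x ∈ s) :
    PySem.List.max? l (fun x => x) = PySem.List.max? s (fun x => x) := by
  cases h1 : PySem.List.max? l (fun x => x) with
  | none => exact absurd ((PySem.List.max?_eq_none_iff l _).mp h1) hne
  | some m =>
    cases h2 : PySem.List.max? s (fun x => x) with
    | none =>
      have hs : s = [] := (PySem.List.max?_eq_none_iff s _).mp h2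
      rcases List.exists_mem_of_ne_nil l hne with ⟨x, hx⟩
      rw [hs] at hmem
      exact absurd ((hmem x).mp hx) (List.not_mem_nil)
    | some m' =>
      have hm : m ≤ m' := PySem.List.max?_isMax h2 m ((hmem m).mp (PySem.List.max?_mem h1))
      have hm' : m' ≤ m := PySem.List.max?_isMax h1 m' ((hmem m').mpr (PySem.List.max?_mem h2))
      rw [le_antisymm hm hm']

lemma pvProd_nonneg : ∀ (l : List Int) (a : Int), 0 ≤ a → (∀ p ∈ l, 0 ≤ p) →
    0 ≤ l.foldl (· * ·) a := by
  intro l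
  induction l with
  | nil => intro a ha _; exact ha
  | cons p rest ih =>
    intro a ha hp
    exact ih _ (mul_nonneg ha (hp p List.mem_cons_self)) (fun r hr => hp r (List.mem_cons_of_mem _ hr))

lemma pvProd_eq_foldl (l : List Int) : l.prod = l.foldl (· * ·) 1 :=
  List.prod_eq_foldl

-- ===== VERDICT (by name: the statement is the Claim_ definition above) =====
theorem count_find_num_spec : Claim_equal_count_find_num := by
  intro primesL limit _ hpre
  unfold Spec_count_find_num count_find_num count_find_num_alt
  by_cases htl : primesL.foldl (· * ·) 1 > limit
  · simp only [if_pos htl]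
  · simp only [if_neg htl]
    have hnn : ∀ p ∈ primesL, 0 ≤ p := by
      rcases hpre with h | h
      · exact h
      · rw [pvProd_eq_foldl] at h; omega
    have htot : 0 ≤ primesL.foldl (· * ·) 1 := pvProd_nonneg primesL 1 (by norm_num) hnn
    have hlim : 0 ≤ limit := by omega
    have hstart : PySem.Set.add PySem.Set.empty (primesL.foldl (· * ·) 1) = [primesL.foldl (· * ·) 1] := rfl
    rw [hstart]
    have hInv0 : pvInv limit [primesL.foldl (· * ·) 1] := by
      refine ⟨List.nodup_singleton _, ?_⟩
      intro v hv
      rcases List.mem_singleton.mp hv with rfl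
      exact ⟨htot, by omega⟩
    obtain ⟨hIl, hIs, hne, hmem⟩ := pvOuter limit hlim primesL
      [primesL.foldl (· * ·) 1] [primesL.foldl (· * ·) 1] hnn hInv0 hInv0
      (by simp) (fun x => Iff.rfl)
    have hlen := pvLen_eq hIl.1 hIs.1 hmem
    have hmax := pvMax_eq hne hmem
    simp only [PySem.Set.len, hlen, hmax]
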